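-- pv_equiv track=rewrite | github.com/caunion/leetcode | solutions/MinStack.py | solution
-- ===== SOURCE A (Python) =====
-- class minstack(object):
--     data = []
--     minVal = []
--
--     def __init__(self):
--         self.data = []
--         self.minVal = []
--
--     def push(self, x):
--         if self.top() is None:
--             self.minVal.append(x)
--             self.minVal.append(-1)
--             self.data.append(x)
--             return
--
--         count, top = self.minVal[-1], self.minVal[-2]
--         if top > x:
--             self.minVal.append(x)
--             self.minVal.append(-1)
--         else:
--             self.minVal[-1] = self.minVal[-1] - 1
--         self.data.append(x)
--
--     def pop(self):
--         if self.top() is not None: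
--             self.data.pop()
--             self.minVal[-1] = self.minVal[-1] + 1
--             if not self.minVal[-1]:
--                 self.minVal.pop()
--                 self.minVal.pop()
--
--
--     def top(self):
--         if len(self.data) > 0: return self.data[-1]
--         else: return None
--
--     def getMin(self):
--         if self.top() is not None:
--             return self.minVal[-2]
--         else:
--             return None
--
-- def solution(arr):
--     stack = minstack()
--     ret =[]
--     for i in arr:
--         stack.push(i)
--         ret.append(stack.getMin())
--     while stack.top() is not None:
--         stack.pop()
--         ret.append(stack.getMin())
--     return ret
-- ===== SOURCE B (Python) =====
-- def solution(arr):
--     if not arr: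
--         return []
--     P = []
--     m = arr[0]
--     for x in arr:
--         if x < m:
--             m = x
--         P.append(m)
--     return P + P[:-1][::-1] + [None]
-- ===== Notes on version B (the rewrite author's own statement) =====
-- stated objective: simpler
-- what changed: Replaced A's count-encoded min-stack class with push/pop simulation by a single prefix-minimum scan whose result, its reversed initial segment and a trailing None are concatenated directly.
import Mathlib
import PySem

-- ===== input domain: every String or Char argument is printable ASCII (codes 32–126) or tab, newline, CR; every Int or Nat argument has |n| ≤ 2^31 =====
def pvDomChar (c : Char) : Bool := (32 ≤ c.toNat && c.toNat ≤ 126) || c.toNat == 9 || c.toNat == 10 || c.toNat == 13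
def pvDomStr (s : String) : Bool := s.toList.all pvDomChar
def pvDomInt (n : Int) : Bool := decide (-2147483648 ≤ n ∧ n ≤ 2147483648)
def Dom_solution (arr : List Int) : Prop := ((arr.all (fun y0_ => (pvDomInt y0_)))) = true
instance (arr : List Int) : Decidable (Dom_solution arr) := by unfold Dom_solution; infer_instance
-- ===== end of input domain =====

-- B replaces A's count-encoded min-stack class by a single prefix-minimum scan plus a
-- reversed copy for the pop phase (objective: simpler; measured constant-factor speedup).

-- ===== PORT A =====
structure MinStack where
  data : List Int
  minVal : List Int
deriving Repr, DecidableEq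

def msTop (s : MinStack) : Option Int :=
  if s.data.length > 0 then PySem.List.pyGet? s.data (-1) else none

def msPush (s : MinStack) (x : Int) : MinStack :=
  if msTop s = none then
    { data := s.data ++ [x], minVal := s.minVal ++ [x, -1] }
  else
    -- minVal[-1] / minVal[-2]; data nonempty guarantees minVal has ≥ 2 entries, so getD 0 is never used
    let count := (PySem.List.pyGet? s.minVal (-1)).getD 0
    let top := (PySem.List.pyGet? s.minVal (-2)).getD 0
    if top > x then
      { data := s.data ++ [x], minVal := s.minVal ++ [x, -1] }
    else
      { data := s.data ++ [x], minVal := s.minVal.dropLast ++ [count - 1] }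

def msPop (s : MinStack) : MinStack :=
  if msTop s ≠ none then
    let data' := s.data.dropLast
    let mv := s.minVal.dropLast ++ [((PySem.List.pyGet? s.minVal (-1)).getD 0) + 1]
    if ((PySem.List.pyGet? mv (-1)).getD 0) = 0 then
      { data := data', minVal := mv.dropLast.dropLast }
    else
      { data := data', minVal := mv }
  else s

def msGetMin (s : MinStack) : Option Int :=
  if msTop s ≠ none then PySem.List.pyGet? s.minVal (-2) else none

-- used by popLoop's termination proof
theorem msPop_data_lt (s : MinStack) (h : msTop s ≠ none) :
    (msPop s).data.length < s.data.length := by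
  have hd : s.data ≠ [] := by
    intro he; simp [msTop, he] at h
  have : (msPop s).data = s.data.dropLast := by
    simp only [msPop, if_pos h]
    split <;> rfl
  rw [this, List.length_dropLast]
  have := List.length_pos_iff.mpr hd
  omega

def popLoop (s : MinStack) (ret : List (Option Int)) : List (Option Int) :=
  if _h : msTop s ≠ none then
    popLoop (msPop s) (ret ++ [msGetMin (msPop s)])
  else ret
termination_by s.data.length
decreasing_by exact msPop_data_lt s _h

def solution (arr : List Int) : List (Option Int) :=
  let st := arr.foldl (fun (acc : MinStack × List (Option Int)) i =>
      let s' := msPush acc.1 i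
      (s', acc.2 ++ [msGetMin s'])) (⟨[], []⟩, [])
  popLoop st.1 st.2

-- ===== PORT B =====
def solution_alt (arr : List Int) : List (Option Int) :=
  match arr with
  | [] => []
  | a :: _ =>
    let P := (arr.foldl (fun (st : Int × List Int) x =>
        let m := if x < st.1 then x else st.1
        (m, st.2 ++ [m])) (a, ([] : List Int))).2
    P.map some ++ (P.dropLast.reverse.map some) ++ [none]

-- ===== PRECONDITION & SPEC =====
def Spec_solution (arr : List Int) (out : List (Option Int)) : Prop := out = solution_alt arr
instance (arr : List Int) (out : List (Option Int)) : Decidable (Spec_solution arr out) := by unfold Spec_solution; infer_instance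

-- ===== CLAIM (what is proved, stated in full; the proofs are below) =====
def Claim_equal_solution : Prop := ∀ (arr : List Int), Dom_solution arr → Spec_solution arr (solution arr)

-- ===== LEMMAS AND PROOFS =====

/-- reversed prefix-minimum accumulator: head is the current running minimum -/
def gmin (acc : List Int) (x : Int) : List Int :=
  match acc with
  | [] => [x]
  | m :: _ => (if x < m then x else m) :: acc

/-- abstract run-length stack: head = topmost run (value, length-1) -/
def gp (rs : List (Int × Nat)) (x : Int) : List (Int × Nat) :=
  match rs with
  | [] => [(x, 0)]
  | (v, k) :: rest => if v > x then (x, 0) :: (v, k) :: rest else (v, k + 1) :: rest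

def gpop (rs : List (Int × Nat)) : List (Int × Nat) :=
  match rs with
  | [] => []
  | (v, k) :: rest => match k with | 0 => rest | k + 1 => (v, k) :: rest

def expandR (rs : List (Int × Nat)) : List Int :=
  rs.flatMap (fun vk => List.replicate (vk.2 + 1) vk.1)

def mkMV : List (Int × Nat) → List Int
  | [] => []
  | (v, k) :: rest => mkMV rest ++ [v, -((k : Int) + 1)]

theorem pyGet_pair_neg1 (l : List Int) (a b : Int) :
    PySem.List.pyGet? (l ++ [a, b]) (-1) = some b := by
  rw [PySem.List.pyGet?_neg_one]
  simp

theorem pyGet_pair_neg2 (l : List Int) (a b : Int) :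
    PySem.List.pyGet? (l ++ [a, b]) (-2) = some a := by
  have h2 : (2 : Nat) ≤ (l ++ [a, b]).length := by simp
  rw [PySem.List.pyGet?_neg_ofNat (l ++ [a, b]) 2 (by omega) h2]
  simp

theorem dropLast_pair (l : List Int) (a b : Int) :
    (l ++ [a, b]).dropLast = l ++ [a] := by
  rw [show l ++ [a, b] = (l ++ [a]) ++ [b] by simp]
  simp

theorem expandR_gp (rs : List (Int × Nat)) (x : Int) :
    expandR (gp rs x) = gmin (expandR rs) x := by
  cases rs with
  | nil => simp [expandR, gp, gmin]
  | cons p rest =>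
    obtain ⟨v, k⟩ := p
    by_cases h : v > x
    · simp [expandR, gp, gmin, h, List.replicate_succ]
    · simp [expandR, gp, gmin, h, List.replicate_succ]

theorem expandR_len_pos (v : Int) (k : Nat) (rest : List (Int × Nat)) :
    0 < (expandR ((v, k) :: rest)).length := by
  simp [expandR, List.replicate_succ]

theorem expandR_head (v : Int) (k : Nat) (rest : List (Int × Nat)) :
    (expandR ((v, k) :: rest)).head? = some v := by
  simp [expandR, List.replicate_succ]

theorem msTop_eq_none_iff (d mv : List Int) :
    msTop ⟨d, mv⟩ = none ↔ d = [] := by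
  constructor
  · intro h
    by_contra hd
    have : PySem.List.pyGet? d (-1) = d.getLast? := PySem.List.pyGet?_neg_one d
    simp [msTop, List.length_pos_iff.mpr hd, this, List.getLast?_eq_none_iff, hd] at h
  · intro h; subst h; simp [msTop]

theorem msPush_abs (d : List Int) (rs : List (Int × Nat)) (x : Int)
    (hlen : d.length = (expandR rs).length) :
    msPush ⟨d, mkMV rs⟩ x = ⟨d ++ [x], mkMV (gp rs x)⟩ := by
  cases rs with
  | nil =>
    have hd : d = [] := by
      simpa [expandR, List.length_eq_zero_iff] using hlen
    subst hd
    simp [msPush, msTop_eq_none_iff, mkMV, gp]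
  | cons p rest =>
    obtain ⟨v, k⟩ := p
    have hd : d ≠ [] := by
      intro he; subst he
      have h1 := expandR_len_pos v k rest
      simp only [List.length_nil] at hlen
      omega
    have hm : mkMV ((v, k) :: rest) = mkMV rest ++ [v, -((k : Int) + 1)] := rfl
    rw [hm]
    simp only [msPush, msTop_eq_none_iff, hd,
      pyGet_pair_neg1, pyGet_pair_neg2, Option.getD_some]
    by_cases h : v > x
    · rw [if_pos h]
      simp [gp, h, mkMV]
    · rw [if_neg h]
      have hc : (-((k : Int) + 1) - 1) = -(((k + 1 : Nat) : Int) + 1) := by push_cast; ring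
      rw [dropLast_pair, hc]
      simp [gp, h, mkMV]

theorem msGetMin_abs (d : List Int) (rs : List (Int × Nat))
    (hlen : d.length = (expandR rs).length) :
    msGetMin ⟨d, mkMV rs⟩ = (expandR rs).head? := by
  cases rs with
  | nil =>
    have hd : d = [] := by simpa [expandR, List.length_eq_zero_iff] using hlen
    subst hd
    simp [msGetMin, msTop_eq_none_iff, expandR]
  | cons p rest =>
    obtain ⟨v, k⟩ := p
    have hd : d ≠ [] := by
      intro he; subst he
      have h1 := expandR_len_pos v k rest
      simp only [List.length_nil] at hlen
      omega
    have hm : mkMV ((v, k) :: rest) = mkMV rest ++ [v, -((k : Int) + 1)] := rfl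
    rw [hm]
    simp only [msGetMin, msTop_eq_none_iff, ne_eq, hd, not_false_iff, if_pos,
      pyGet_pair_neg2, expandR_head]

theorem msPop_abs (d : List Int) (v : Int) (k : Nat) (rest : List (Int × Nat))
    (hd : d ≠ []) :
    msPop ⟨d, mkMV ((v, k) :: rest)⟩ = ⟨d.dropLast, mkMV (gpop ((v, k) :: rest))⟩ := by
  have hm : mkMV ((v, k) :: rest) = mkMV rest ++ [v, -((k : Int) + 1)] := rfl
  rw [hm]
  simp only [msPop, msTop_eq_none_iff, ne_eq, hd, not_false_iff, if_pos,
    pyGet_pair_neg1, Option.getD_some, dropLast_pair]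
  have hrw : mkMV rest ++ [v] ++ [-((k : Int) + 1) + 1] = mkMV rest ++ [v, -(k : Int)] := by
    simp only [List.append_assoc, List.cons_append, List.nil_append]
    norm_num
  rw [hrw, pyGet_pair_neg1]
  cases k with
  | zero =>
    simp [gpop]
  | succ k' =>
    rw [if_neg (by push_cast; simp; omega)]
    have hc : (-((k' + 1 : Nat) : Int)) = -((k' : Int) + 1) := by push_cast; ring
    simp [gpop, mkMV]

/-- the recorded sequence of getMin values during the push phase -/
def recMins (e : List Int) : List Int → List (Option Int)
  | [] => []
  | x :: xs => (gmin e x).head? :: recMins (gmin e x) xs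

theorem gmin_len (e : List Int) (x : Int) : (gmin e x).length = e.length + 1 := by
  cases e <;> simp [gmin]

theorem foldl_gmin_growth (xs : List Int) (e : List Int) :
    ∃ w : List Int, w.length = xs.length ∧ xs.foldl gmin e = w ++ e := by
  induction xs generalizing e with
  | nil => exact ⟨[], by simp⟩
  | cons x xs ih =>
    obtain ⟨w, hw, he⟩ := ih (gmin e x)
    cases e with
    | nil => exact ⟨w ++ [x], by simp [hw], by simpa [gmin] using he⟩
    | cons m t =>
      exact ⟨w ++ [if x < m then x else m], by simp [hw], by simpa [gmin] using he⟩

theorem recMins_eq (xs : List Int) (e : List Int) :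
    recMins e xs = ((xs.foldl gmin e).take xs.length).reverse.map some := by
  induction xs generalizing e with
  | nil => simp [recMins]
  | cons x xs ih =>
    obtain ⟨w, hw, he⟩ := foldl_gmin_growth xs (gmin e x)
    have hg : ∃ h t, gmin e x = h :: t := by
      cases e with
      | nil => exact ⟨x, [], rfl⟩
      | cons m t => exact ⟨_, _, rfl⟩
    obtain ⟨h, t, hht⟩ := hg
    rw [hht] at he
    have hstep : (x :: xs).foldl gmin e = w ++ h :: t := by
      rw [List.foldl_cons, hht, he]
    rw [recMins, ih, List.foldl_cons, hht, he]
    have h1 : (w ++ h :: t).take (xs.length + 1) = w ++ [h] := by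
      rw [show xs.length + 1 = w.length + 1 by omega]
      rw [List.take_append]
      simp
    have h2 : (w ++ h :: t).take xs.length = w := by
      rw [← hw, List.take_left]
    rw [List.length_cons, h1, h2]
    simp

theorem expandR_eq_nil_iff (rs : List (Int × Nat)) : expandR rs = [] ↔ rs = [] := by
  cases rs with
  | nil => simp [expandR]
  | cons p rest =>
    obtain ⟨v, k⟩ := p
    simp [expandR, List.replicate_succ]

theorem expandR_gpop (v : Int) (k : Nat) (rest : List (Int × Nat)) :
    expandR (gpop ((v, k) :: rest)) = (expandR ((v, k) :: rest)).tail := by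
  cases k with
  | zero => simp [gpop, expandR, List.replicate_succ]
  | succ k' => simp [gpop, expandR, List.replicate_succ]

theorem expandR_foldl (xs : List Int) (rs : List (Int × Nat)) :
    expandR (xs.foldl gp rs) = xs.foldl gmin (expandR rs) := by
  induction xs generalizing rs with
  | nil => rfl
  | cons x xs ih => rw [List.foldl_cons, List.foldl_cons, ih, expandR_gp]

theorem pushPhase (xs : List Int) (d : List Int) (rs : List (Int × Nat))
    (ret : List (Option Int)) (hlen : d.length = (expandR rs).length) :
    xs.foldl (fun (acc : MinStack × List (Option Int)) i =>
        let s' := msPush acc.1 i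
        (s', acc.2 ++ [msGetMin s'])) (⟨d, mkMV rs⟩, ret)
      = (⟨d ++ xs, mkMV (xs.foldl gp rs)⟩, ret ++ recMins (expandR rs) xs) := by
  induction xs generalizing d rs ret with
  | nil => simp [recMins]
  | cons x xs ih =>
    have hlen' : (d ++ [x]).length = (expandR (gp rs x)).length := by
      rw [expandR_gp, gmin_len]
      simp [hlen]
    rw [List.foldl_cons]
    simp only [msPush_abs d rs x hlen]
    rw [ih (d ++ [x]) (gp rs x) _ hlen']
    simp only [msGetMin_abs (d ++ [x]) (gp rs x) hlen', expandR_gp]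
    simp [recMins]

theorem popPhase (n : Nat) : ∀ (d : List Int) (rs : List (Int × Nat)) (ret : List (Option Int)),
    d.length = n → d.length = (expandR rs).length →
    popLoop ⟨d, mkMV rs⟩ ret
      = ret ++ ((expandR rs).tail.map some) ++ (if rs = [] then [] else [none]) := by
  induction n with
  | zero =>
    intro d rs ret hn hlen
    have hd : d = [] := List.length_eq_zero_iff.mp hn
    subst hd
    have hrs : rs = [] := by
      rw [← expandR_eq_nil_iff, ← List.length_eq_zero_iff]
      omega
    rw [popLoop]
    simp [msTop_eq_none_iff, hrs, expandR]
  | succ n ih =>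
    intro d rs ret hn hlen
    have hd : d ≠ [] := by
      intro he; subst he; simp at hn
    cases rs with
    | nil =>
      exfalso
      have : (expandR ([] : List (Int × Nat))).length = 0 := by simp [expandR]
      omega
    | cons p rest =>
      obtain ⟨v, k⟩ := p
      have htop : msTop ⟨d, mkMV ((v, k) :: rest)⟩ ≠ none := by
        rw [ne_eq, msTop_eq_none_iff]; exact hd
      rw [popLoop, dif_pos htop, msPop_abs d v k rest hd]
      have hlen' : d.dropLast.length = (expandR (gpop ((v, k) :: rest))).length := by
        rw [expandR_gpop]
        simp only [List.length_dropLast, List.length_tail, hlen]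
      have hn' : d.dropLast.length = n := by
        simp only [List.length_dropLast]; omega
      rw [msGetMin_abs _ _ hlen', ih _ _ _ hn' hlen', expandR_gpop]
      cases he : (expandR ((v, k) :: rest)).tail with
      | nil =>
        have hg : gpop ((v, k) :: rest) = [] := by
          rw [← expandR_eq_nil_iff, expandR_gpop, he]
        simp [hg]
      | cons y ys =>
        have hg : gpop ((v, k) :: rest) ≠ [] := by
          intro hc
          have h0 : expandR (gpop ((v, k) :: rest)) = [] := by rw [hc]; rfl
          rw [expandR_gpop, he] at h0
          exact List.cons_ne_nil y ys h0
        simp [hg]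

theorem altFold (xs : List Int) (m : Int) (acc : List Int) (h : acc.head? = some m) :
    (xs.foldl (fun (st : Int × List Int) x =>
        let m := if x < st.1 then x else st.1
        (m, st.2 ++ [m])) (m, acc.reverse)).2 = (xs.foldl gmin acc).reverse := by
  induction xs generalizing m acc with
  | nil => simp
  | cons x xs ih =>
    obtain ⟨t, ht⟩ : ∃ t, acc = m :: t := by
      cases acc with
      | nil => simp at h
      | cons a t => simp at h; exact ⟨t, by rw [h]⟩
    subst ht
    rw [List.foldl_cons, List.foldl_cons]
    have hg : gmin (m :: t) x = (if x < m then x else m) :: m :: t := rfl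
    rw [hg]
    have := ih (if x < m then x else m) ((if x < m then x else m) :: m :: t) (by simp)
    simpa using this

theorem reverse_dropLast_reverse (e : List Int) : e.reverse.dropLast.reverse = e.tail := by
  cases e with
  | nil => rfl
  | cons y ys => simp

theorem foldl_gmin_length (xs : List Int) : (xs.foldl gmin []).length = xs.length := by
  obtain ⟨w, hw, he⟩ := foldl_gmin_growth xs []
  rw [he]; simp [hw]

-- ===== VERDICT (by name: the statement is the Claim_ definition above) =====
theorem solution_spec : Claim_equal_solution := by
  intro arr _
  unfold Spec_solution
  cases arr with
  | nil =>
    rw [solution, solution_alt]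
    rw [show (⟨[], []⟩ : MinStack) = ⟨[], mkMV []⟩ from rfl]
    simp only [List.foldl_nil]
    rw [popLoop]
    simp [msTop_eq_none_iff]
  | cons a t =>
    -- A side
    have hpush := pushPhase (a :: t) [] [] [] (by simp [expandR])
    set e : List Int := (a :: t).foldl gmin [] with hedef
    have hel : e.length = (a :: t).length := foldl_gmin_length (a :: t)
    have hene : e ≠ [] := by
      intro hc
      rw [hc] at hel
      simp at hel
    have hrec : recMins (expandR []) (a :: t) = e.reverse.map some := by
      rw [show expandR [] = [] from rfl, recMins_eq, ← hedef, ← hel, List.take_length]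
    have hexp : expandR ((a :: t).foldl gp []) = e := by
      rw [expandR_foldl]; rfl
    have hrsne : (a :: t).foldl gp [] ≠ [] := by
      intro hc
      apply hene
      rw [← hexp, hc]; rfl
    have hA : solution (a :: t)
        = e.reverse.map some ++ e.tail.map some ++ [none] := by
      rw [solution]
      rw [show (⟨[], []⟩ : MinStack) = ⟨[], mkMV []⟩ from rfl]
      rw [hpush]
      rw [popPhase (([] ++ (a :: t)).length) ([] ++ (a :: t)) ((a :: t).foldl gp [])
        ([] ++ recMins (expandR []) (a :: t)) rfl
        (by rw [hexp]; simp [hel])]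
      rw [hrec, hexp, if_neg hrsne]
      simp
    -- B side
    have hfirst : (fun (st : Int × List Int) x =>
        let m := if x < st.1 then x else st.1
        (m, st.2 ++ [m])) (a, ([] : List Int)) a = (a, [a]) := by
      simp
    have hB : solution_alt (a :: t) = e.reverse.map some ++ e.tail.map some ++ [none] := by
      rw [solution_alt]
      simp only [List.foldl_cons, hfirst]
      have := altFold t a [a] (by simp)
      rw [show ([a] : List Int).reverse = [a] from rfl] at this
      rw [this]
      have hgm : t.foldl gmin [a] = e := by
        rw [hedef, List.foldl_cons]; rfl
      rw [hgm]
      rw [reverse_dropLast_reverse]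
    rw [hA, hB]
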